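-- pv_equiv track=rewrite | github.com/snotbubble/py_widgets_ios | cvd/cvd.py | orgtab
-- ===== SOURCE A (Python) =====
-- def orgtab(s) :
-- # function to clean up a non-aligned org table
-- # intedned for editing orgfile tables in editorial (ios)
-- 	lines = s.split('\n')
-- 	mxl = []
-- 	tbl = ""
-- # get max column widths
-- 	for i in lines :
-- 		p = i.split('|')
-- 		c = 0
-- 		for s in p :
-- 			if s != "" :
-- 				sl = len(s)
-- 				if len(mxl) <= c :
-- 					mxl.append(sl)
-- 				else :
-- 					if sl > mxl[c] :
-- 						mxl[c] = sl
-- 				c = c + 1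
-- # have the max column widths, now use them to pad cells...
-- 	for i in lines :
-- 		p = i.split('|')
-- 		c = 0
-- 		row = ""
-- 		for s in p :
-- 			if s != "" :
-- 				q = s.ljust(mxl[c]," ")
-- 				if s.strip() != "" :
-- 					if s[0] == "-" :
-- 						q = s.ljust(mxl[c],"-")
-- 				row = row + "|" + q
-- 				c = c + 1
-- 		if row.strip() != "" : row = row + "|\n"
-- 		tbl = tbl + row
-- 	lines = 0
-- 	return tbl
-- ===== SOURCE B (Python) =====
-- def orgtab(s):
--     # align an org table by padding it in place, one column sweep at a time
--     rows = [[x for x in line.split('|') if x != ''] for line in s.split('\n')]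
--     for c in range(max(map(len, rows), default=0)):
--         w = max(len(r[c]) for r in rows if c < len(r))
--         for r in rows:
--             if c < len(r):
--                 fill = '-' if r[c].strip() != '' and r[c][0] == '-' else ' '
--                 r[c] = r[c].ljust(w, fill)
--     return ''.join('|' + '|'.join(r) + '|\n' for r in rows if r)
-- ===== Notes on version B (the rewrite author's own statement) =====
-- stated objective: alternative
-- what changed: B keeps no width list at all: it parses the lines once into rows of non-empty cells and then pads the table in place, one column sweep at a time (each sweep computes that column's max width and immediately ljust-pads that column's cells), finally rendering the non-empty rows with a pipe-join, whereas A accumulates a mxl width list row-major in one pass and re-splits every line to pad row-major in a second pass.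
import Mathlib
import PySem

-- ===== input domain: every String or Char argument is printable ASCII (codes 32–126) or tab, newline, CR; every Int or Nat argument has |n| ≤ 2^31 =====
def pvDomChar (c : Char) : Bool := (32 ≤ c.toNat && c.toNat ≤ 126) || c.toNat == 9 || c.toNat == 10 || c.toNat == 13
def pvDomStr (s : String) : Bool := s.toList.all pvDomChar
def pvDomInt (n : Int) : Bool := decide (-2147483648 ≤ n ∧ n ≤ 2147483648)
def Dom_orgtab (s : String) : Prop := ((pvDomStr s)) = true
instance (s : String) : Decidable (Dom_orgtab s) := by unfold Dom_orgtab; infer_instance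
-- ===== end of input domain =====

-- B aligns the table with no width list at all: it parses the rows once and then pads them in place,
-- one column sweep at a time (width computed and applied within the same sweep); proved equal to A on
-- all inputs (objective: alternative, same asymptotic cost).

-- shared Python builtin: s.ljust(w, f)
def pvLjust (cs : List Char) (w : Nat) (f : Char) : List Char :=
  cs ++ List.replicate (w - cs.length) f

-- ===== PORT A =====
-- one step of A's first inner loop (state = (mxl, c)); empty cells are skipped
def pvAStep1 (st : List Nat × Nat) (cell : List Char) : List Nat × Nat :=
  if cell ≠ [] then
    (if st.1.length ≤ st.2 then st.1 ++ [cell.length]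
     else if cell.length > st.1.getD st.2 0 then st.1.set st.2 cell.length else st.1,
     st.2 + 1)
  else st

-- A's padding of one cell: q = ljust ' '; overwritten by ljust '-' for dash-leading non-blank cells
def pvAPad (cell : List Char) (w : Nat) : List Char :=
  let q := pvLjust cell w ' '
  if PySem.Chars.strip cell ≠ [] then
    (if PySem.List.pyGet? cell 0 = some '-' then pvLjust cell w '-' else q)
  else q

-- one step of A's second inner loop (state = (row, c))
def pvAStep2 (mxl : List Nat) (st : List Char × Nat) (cell : List Char) : List Char × Nat :=
  if cell ≠ [] then (st.1 ++ '|' :: pvAPad cell (mxl.getD st.2 0), st.2 + 1) else st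

-- A's body of the second outer loop: build the row, then append "|\n" unless it strips to empty
def pvARow (mxl : List Nat) (i : List Char) : List Char :=
  let row := ((PySem.Chars.splitOn i ['|']).foldl (pvAStep2 mxl) ([], 0)).1
  if PySem.Chars.strip row ≠ [] then row ++ ['|', '\n'] else row

def orgtab (s : String) : String :=
  let lines := PySem.Chars.splitOn s.toList ['\n']
  let mxl := lines.foldl (fun m i => ((PySem.Chars.splitOn i ['|']).foldl pvAStep1 (m, 0)).1) []
  String.mk (lines.foldl (fun tbl i => tbl ++ pvARow mxl i) [])

-- ===== PORT B =====
-- B's padding of one cell: pick the fill char first, ljust once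
def pvBPad (cell : List Char) (w : Nat) : List Char :=
  pvLjust cell w
    (if PySem.Chars.strip cell ≠ [] ∧ PySem.List.pyGet? cell 0 = some '-' then '-' else ' ')

-- one column sweep of Source B's outer loop: compute this column's width, then pad its cells in place
def pvBSweep (rows : List (List (List Char))) (c : Nat) : List (List (List Char)) :=
  let w := ((rows.filterMap (fun r => r[c]?)).map List.length).foldl max 0
  rows.map (fun r => if c < r.length then r.set c (pvBPad (r.getD c []) w) else r)

def orgtab_alt (s : String) : String :=
  let rows0 := (PySem.Chars.splitOn s.toList ['\n']).map
      (fun line => (PySem.Chars.splitOn line ['|']).filter (fun c => decide (c ≠ [])))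
  let rows := (List.range ((rows0.map List.length).foldl max 0)).foldl pvBSweep rows0
  String.mk (PySem.Chars.join []
    ((rows.filter (fun r => decide (r ≠ []))).map
      (fun r => '|' :: PySem.Chars.join ['|'] r ++ ['|', '\n'])))

-- ===== PRECONDITION & SPEC =====
def Spec_orgtab (s : String) (out : String) : Prop := out = orgtab_alt s
instance (s : String) (out : String) : Decidable (Spec_orgtab s out) := by unfold Spec_orgtab; infer_instance

-- ===== CLAIM (what is proved, stated in full; the proofs are below) =====
def Claim_equal_orgtab : Prop := ∀ (s : String), Dom_orgtab s → Spec_orgtab s (orgtab s)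

-- ===== LEMMAS AND PROOFS =====

-- column-wise combination of two width lists
def pvMerge : List Nat → List Nat → List Nat
  | a, [] => a
  | [], b => b
  | a :: as, b :: bs => max a b :: pvMerge as bs

theorem pvMerge_nil_left (b : List Nat) : pvMerge [] b = b := by cases b <;> rfl

theorem pvMerge_length : ∀ (a b : List Nat), (pvMerge a b).length = max a.length b.length := by
  intro a
  induction a with
  | nil => intro b; rw [pvMerge_nil_left]; simp
  | cons x xs ih =>
    intro b
    cases b with
    | nil => simp [pvMerge]
    | cons y ys => simp [pvMerge, ih]

theorem pvMerge_getD : ∀ (a b : List Nat) (c : Nat),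
    (pvMerge a b)[c]?.getD 0 = max (a[c]?.getD 0) (b[c]?.getD 0) := by
  intro a
  induction a with
  | nil => intro b c; rw [pvMerge_nil_left]; simp
  | cons x xs ih => intro b c; cases b <;> cases c <;> simp [pvMerge, ih]

theorem pvJoin_nil (l : List (List Char)) : PySem.Chars.join [] l = l.flatten := by
  induction l with
  | nil => rfl
  | cons a t ih =>
    cases t with
    | nil => simp [PySem.Chars.join, List.intercalate]
    | cons b t2 => rw [PySem.Chars.join_cons_cons, List.flatten_cons, ih]; simp

theorem pvJoin_singleton (p : List Char) (sep : List Char) :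
    PySem.Chars.join sep [p] = p := by
  simp [PySem.Chars.join, List.intercalate]

theorem pvStrip_bar (r : List Char) : PySem.Chars.strip ('|' :: r) ≠ [] := by
  have h : PySem.Chars.isspace '|' = false := by decide
  simp [PySem.Chars.strip, PySem.Chars.lstrip, PySem.Chars.rstrip]
  exact ⟨'|', by simp [List.dropWhile, h], by decide⟩

-- A's first pass over one line, from state (pre ++ rest, |pre|), merges the cell widths into rest
theorem pvPass1_line : ∀ (cs : List (List Char)) (pre rest : List Nat),
    cs.foldl pvAStep1 (pre ++ rest, pre.length)
      = (pre ++ pvMerge rest ((cs.filter (fun x => decide (x ≠ []))).map List.length),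
         pre.length + (cs.filter (fun x => decide (x ≠ []))).length) := by
  intro cs
  induction cs with
  | nil => intro pre rest; cases rest <;> simp [pvMerge]
  | cons a t ih =>
    intro pre rest
    by_cases ha : a = []
    · subst ha
      rw [List.foldl_cons]
      have : pvAStep1 (pre ++ rest, pre.length) [] = (pre ++ rest, pre.length) := by
        simp [pvAStep1]
      rw [this, ih]
      simp
    · rw [List.foldl_cons]
      have hf : (a :: t).filter (fun x => decide (x ≠ [])) = a :: t.filter (fun x => decide (x ≠ [])) := by
        simp [ha]
      cases rest with
      | nil =>
        have hstep : pvAStep1 (pre ++ [], pre.length) a = (pre ++ [a.length], pre.length + 1) := by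
          simp [pvAStep1, ha]
        rw [hstep]
        have h2 := ih (pre ++ [a.length]) []
        simp only [List.append_nil, List.length_append, List.length_cons, List.length_nil,
          List.append_assoc, List.singleton_append] at h2 ⊢
        rw [h2, hf]
        simp [pvMerge_nil_left]
        omega
      | cons x rest' =>
        have hstep : pvAStep1 (pre ++ x :: rest', pre.length) a
            = (pre ++ (max x a.length) :: rest', pre.length + 1) := by
          have hlen : ¬ ((pre ++ x :: rest').length ≤ pre.length) := by simp
          have hgetD : (pre ++ x :: rest').getD pre.length 0 = x := by
            simp [List.getD]
          have hset : (pre ++ x :: rest').set pre.length a.length = pre ++ a.length :: rest' := by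
            simp
          simp only [pvAStep1, ha, ne_eq, not_false_iff, if_true, hlen, if_false, hgetD, hset]
          by_cases hx : a.length > x
          · simp [hx, Nat.max_eq_right (le_of_lt hx)]
          · simp [hx, Nat.max_eq_left (Nat.le_of_not_lt hx)]
        rw [hstep]
        have h2 := ih (pre ++ [max x a.length]) rest'
        simp only [List.length_append, List.length_cons, List.length_nil,
          List.append_assoc, List.singleton_append] at h2 ⊢
        rw [h2, hf]
        simp [pvMerge]
        omega

-- A's second pass over one line
theorem pvPass2_line (W : List Nat) : ∀ (cs : List (List Char)) (acc : List Char) (c : Nat),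
    cs.foldl (pvAStep2 W) (acc, c)
      = (acc ++ (((cs.filter (fun x => decide (x ≠ []))).zipIdx c).map
            (fun p => '|' :: pvAPad p.1 (W.getD p.2 0))).flatten,
         c + (cs.filter (fun x => decide (x ≠ []))).length) := by
  intro cs
  induction cs with
  | nil => intro acc c; simp
  | cons a t ih =>
    intro acc c
    rw [List.foldl_cons]
    by_cases ha : a = []
    · subst ha
      have : pvAStep2 W (acc, c) [] = (acc, c) := by simp [pvAStep2]
      rw [this, ih]
      simp
    · have hstep : pvAStep2 W (acc, c) a = (acc ++ '|' :: pvAPad a (W.getD c 0), c + 1) := by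
        simp [pvAStep2, ha]
      rw [hstep, ih]
      have hf : (a :: t).filter (fun x => decide (x ≠ [])) = a :: t.filter (fun x => decide (x ≠ [])) := by
        simp [ha]
      rw [hf, List.zipIdx_cons, List.map_cons, List.flatten_cons]
      simp
      omega

theorem pvPad_eq (cell : List Char) (w : Nat) : pvAPad cell w = pvBPad cell w := by
  unfold pvAPad pvBPad
  split_ifs with h1 h2 h3 h4 <;> try rfl
  all_goals tauto

-- B's column-major width of column c, as a fold over the rows
theorem pvColmax : ∀ (rows : List (List (List Char))) (c n : Nat),
    ((rows.filterMap (fun r => r[c]?)).map List.length).foldl max n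
      = rows.foldl (fun n r => max n ((r.map List.length).getD c 0)) n := by
  intro rows
  induction rows with
  | nil => intro c n; rfl
  | cons r t ih =>
    intro c n
    by_cases hc : c < r.length
    · rw [List.filterMap_cons]
      simp only [List.getElem?_eq_getElem hc]
      rw [List.map_cons, List.foldl_cons, List.foldl_cons, ih]
      congr 1
      simp [List.getD, hc]
    · have hnone : r[c]? = none := by simp; omega
      rw [List.filterMap_cons, hnone]
      rw [List.foldl_cons, ih]
      congr 1
      have hnone2 : (r.map List.length)[c]? = none := by simp; omega
      simp [List.getD, hnone2]

theorem pvFoldlMerge_length : ∀ (L : List (List Nat)) (acc : List Nat),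
    (L.foldl pvMerge acc).length = L.foldl (fun n l => max n l.length) acc.length := by
  intro L
  induction L with
  | nil => intro acc; rfl
  | cons x xs ih => intro acc; simp [List.foldl_cons, ih, pvMerge_length]

theorem pvFoldlMerge_getD : ∀ (L : List (List Nat)) (acc : List Nat) (c : Nat),
    (L.foldl pvMerge acc)[c]?.getD 0 = L.foldl (fun n l => max n (l[c]?.getD 0)) (acc[c]?.getD 0) := by
  intro L
  induction L with
  | nil => intro acc c; rfl
  | cons x xs ih => intro acc c; simp [List.foldl_cons, ih, pvMerge_getD]

-- flatten of '|'-prefixed pieces is '|' followed by the '|'-join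
theorem pvFlatten_join : ∀ (ps : List (List Char)), ps ≠ [] →
    (ps.map (fun p => '|' :: p)).flatten = '|' :: PySem.Chars.join ['|'] ps := by
  intro ps
  induction ps with
  | nil => intro h; exact absurd rfl h
  | cons a t ih =>
    intro _
    cases t with
    | nil => simp [pvJoin_singleton (sep := ['|'])]
    | cons b t2 =>
      rw [List.map_cons, List.flatten_cons, ih (by simp), PySem.Chars.join_cons_cons]
      simp

-- parsed cells of one line (proof-side abbreviation)
def pvCells (line : List Char) : List (List Char) :=
  (PySem.Chars.splitOn line ['|']).filter (fun c => decide (c ≠ []))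

theorem pvNcols (rows : List (List (List Char))) :
    ((rows.map (List.map List.length)).foldl pvMerge []).length
      = rows.foldl (fun m r => max m r.length) 0 := by
  rw [pvFoldlMerge_length, List.foldl_map]
  simp

-- the width of column c of the original rows is entry c of the merged width list
theorem pvWidthc (rows : List (List (List Char))) (c : Nat) :
    ((rows.filterMap (fun r => r[c]?)).map List.length).foldl max 0
      = ((rows.map (List.map List.length)).foldl pvMerge [])[c]?.getD 0 := by
  rw [pvColmax, pvFoldlMerge_getD, List.foldl_map]
  have he : (fun (n : Nat) (r : List (List Char)) => max n ((r.map List.length).getD c 0))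
      = fun n r => max n ((r.map List.length)[c]?.getD 0) := by
    funext n r; simp [List.getD]
  rw [he]
  simp

theorem pvBound (rows : List (List (List Char))) :
    ∀ r ∈ rows, r.length ≤ ((rows.map (List.map List.length)).foldl pvMerge []).length := by
  intro r hrm
  rw [pvNcols]
  calc r.length ≤ (rows.map List.length).foldl max 0 :=
        (PySem.List.le_foldl_max (rows.map List.length) 0).2 r.length (List.mem_map_of_mem hrm)
    _ = rows.foldl (fun m r => max m r.length) 0 := by rw [List.foldl_map]

-- a row with its first n cells padded against width list M
def pvPadPrefix (M : List Nat) (n : Nat) (r : List (List Char)) : List (List Char) :=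
  r.mapIdx (fun k x => if k < n then pvBPad x (M.getD k 0) else x)

theorem pvPadPrefix_length (M : List Nat) (n : Nat) (r : List (List Char)) :
    (pvPadPrefix M n r).length = r.length := by
  simp [pvPadPrefix]

theorem pvPadPrefix_get? (M : List Nat) (n : Nat) (r : List (List Char)) (k : Nat) :
    (pvPadPrefix M n r)[k]? = r[k]?.map (fun x => if k < n then pvBPad x (M.getD k 0) else x) := by
  simp [pvPadPrefix, List.getElem?_mapIdx]

-- one column sweep advances the padded prefix by one column
theorem pvSweep_step (rows : List (List (List Char))) (n : Nat)
    (M : List Nat) (hM : M = (rows.map (List.map List.length)).foldl pvMerge []) :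
    pvBSweep (rows.map (pvPadPrefix M n)) n = rows.map (pvPadPrefix M (n + 1)) := by
  have hw : (((rows.map (pvPadPrefix M n)).filterMap (fun r => r[n]?)).map List.length).foldl max 0
      = M[n]?.getD 0 := by
    rw [List.filterMap_map]
    have : ((fun (r : List (List Char)) => r[n]?) ∘ pvPadPrefix M n) = fun r => r[n]? := by
      funext r
      simp only [Function.comp, pvPadPrefix_get?]
      cases r[n]? <;> simp
    rw [this]
    subst hM
    exact pvWidthc rows n
  unfold pvBSweep
  rw [hw, List.map_map]
  apply List.map_congr_left
  intro r _
  simp only [Function.comp]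
  by_cases hn : n < r.length
  · rw [if_pos (by rw [pvPadPrefix_length]; exact hn)]
    have hget : (pvPadPrefix M n r).getD n [] = r.getD n [] := by
      have := pvPadPrefix_get? M n r n
      simp only [List.getD]
      rw [this]
      cases r[n]? <;> simp
    rw [hget]
    apply List.ext_getElem?
    intro k
    rw [List.getElem?_set, pvPadPrefix_get?, pvPadPrefix_get?]
    by_cases hk : n = k
    · subst hk
      rw [if_pos rfl, if_pos (by rw [pvPadPrefix_length]; exact hn)]
      have : r[n]? = some (r.getD n []) := by
        simp [List.getD, List.getElem?_eq_getElem hn]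
      rw [this]
      simp
    · rw [if_neg hk]
      cases r[k]? <;> simp only [Option.map_some, Option.map_none]
      congr 1
      by_cases h1 : k < n
      · rw [if_pos h1, if_pos (by omega)]
      · rw [if_neg h1, if_neg (by omega)]
  · rw [if_neg (by rw [pvPadPrefix_length]; exact hn)]
    apply List.ext_getElem?
    intro k
    rw [pvPadPrefix_get?, pvPadPrefix_get?]
    cases hrk : r[k]? with
    | none => simp
    | some x =>
      have hk : k < r.length := (List.getElem?_eq_some_iff.mp hrk).1
      have h1 : k < n ↔ k < n + 1 := by omega
      simp only [Option.map_some]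
      congr 1
      by_cases h2 : k < n
      · rw [if_pos h2, if_pos (by omega)]
      · rw [if_neg h2, if_neg (by omega)]

-- folding the column sweeps over range n pads the first n columns
theorem pvSweep_range (rows : List (List (List Char))) :
    ∀ n : Nat, (List.range n).foldl pvBSweep rows = rows.map (pvPadPrefix ((rows.map (List.map List.length)).foldl pvMerge []) n) := by
  intro n
  induction n with
  | zero =>
    simp only [List.range_zero, List.foldl_nil]
    have hid : ∀ r : List (List Char),
        pvPadPrefix ((rows.map (List.map List.length)).foldl pvMerge []) 0 r = r := by
      intro r
      apply List.ext_getElem?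
      intro k
      rw [pvPadPrefix_get?]
      cases r[k]? <;> simp
    exact ((List.map_congr_left (fun r _ => hid r)).trans (List.map_id rows)).symm
  | succ n ih =>
    rw [List.range_succ, List.foldl_append, List.foldl_cons, List.foldl_nil, ih,
      pvSweep_step rows n _ rfl]

-- a fully padded row, written cell-by-cell over zipIdx
theorem pvPadPrefix_full (M : List Nat) (r : List (List Char)) (h : r.length ≤ M.length) :
    pvPadPrefix M M.length r = (r.zipIdx 0).map (fun p => pvBPad p.1 (M.getD p.2 0)) := by
  unfold pvPadPrefix
  rw [List.mapIdx_eq_zipIdx_map]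
  apply List.map_congr_left
  intro p hp
  obtain ⟨a, i⟩ := p
  obtain ⟨hle, hg⟩ := List.mk_mem_zipIdx_iff_le_and_getElem?_sub.mp hp
  simp only [Nat.sub_zero] at hg
  have hi : i < r.length := (List.getElem?_eq_some_iff.mp hg).1
  simp only []
  rw [if_pos (lt_of_lt_of_le hi h)]

-- dropping the empty pieces before flattening changes nothing when they map to []
theorem pvFlatten_filter (l : List (List (List Char))) (f : List (List Char) → List Char) :
    ((l.filter (fun r => decide (r ≠ []))).map f).flatten
      = (l.map (fun r => if r = [] then [] else f r)).flatten := by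
  induction l with
  | nil => rfl
  | cons a t ih =>
    by_cases ha : a = []
    · subst ha
      rw [List.filter_cons_of_neg (by simp), List.map_cons, List.flatten_cons, if_pos rfl,
        List.nil_append, ih]
    · rw [List.filter_cons_of_pos (by simpa using ha), List.map_cons, List.map_cons,
        List.flatten_cons, List.flatten_cons, if_neg ha, ih]

-- A's row for one line equals B's rendering of the fully padded cells
theorem pvRow_eq (M : List Nat) (i : List Char) (h : (pvCells i).length ≤ M.length) :
    pvARow M i = (if pvCells i = [] then []
      else '|' :: PySem.Chars.join ['|'] (pvPadPrefix M M.length (pvCells i)) ++ ['|', '\n']) := by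
  unfold pvARow
  rw [pvPass2_line M (PySem.Chars.splitOn i ['|']) [] 0]
  simp only [List.nil_append]
  rw [show (PySem.Chars.splitOn i ['|']).filter (fun x => decide (x ≠ [])) = pvCells i from rfl]
  cases hc : pvCells i with
  | nil => simp [PySem.Chars.strip, PySem.Chars.lstrip, PySem.Chars.rstrip]
  | cons x rs =>
    rw [← hc]
    have hne : pvCells i ≠ [] := by rw [hc]; simp
    have hmap : ((pvCells i).zipIdx 0).map (fun p => '|' :: pvAPad p.1 (M.getD p.2 0))
        = (((pvCells i).zipIdx 0).map (fun p => pvBPad p.1 (M.getD p.2 0))).map (fun p => '|' :: p) := by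
      rw [List.map_map]
      apply List.map_congr_left
      intro p _
      simp [Function.comp, pvPad_eq]
    rw [hmap, pvFlatten_join _ (by
      simp only [ne_eq, List.map_eq_nil_iff, List.zipIdx_eq_nil_iff]
      exact hne)]
    rw [if_pos (pvStrip_bar _), if_neg hne, pvPadPrefix_full M _ h]

-- the whole table
theorem pvMain (lines : List (List Char)) :
    (lines.foldl (fun tbl i => tbl ++ pvARow
        (lines.foldl (fun m i => ((PySem.Chars.splitOn i ['|']).foldl pvAStep1 (m, 0)).1) []) i) [])
    = PySem.Chars.join []
        ((((List.range (((lines.map pvCells).map List.length).foldl max 0)).foldl pvBSweep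
            (lines.map pvCells)).filter (fun r => decide (r ≠ []))).map
          (fun r => '|' :: PySem.Chars.join ['|'] r ++ ['|', '\n'])) := by
  have hmxl : (lines.foldl (fun m i => ((PySem.Chars.splitOn i ['|']).foldl pvAStep1 (m, 0)).1) [])
      = ((lines.map pvCells).map (List.map List.length)).foldl pvMerge [] := by
    rw [List.map_map, List.foldl_map]
    congr 1
    funext m i
    have h := pvPass1_line (PySem.Chars.splitOn i ['|']) [] m
    simp only [List.nil_append, List.length_nil] at h
    rw [h]
    rfl
  have hn : ((lines.map pvCells).map List.length).foldl max 0
      = (((lines.map pvCells).map (List.map List.length)).foldl pvMerge []).length := by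
    rw [pvNcols, List.foldl_map]
  rw [hmxl, hn, pvSweep_range (lines.map pvCells)]
  set M := ((lines.map pvCells).map (List.map List.length)).foldl pvMerge [] with hMdef
  have hb := pvBound (lines.map pvCells)
  rw [PySem.List.foldl_append_eq_flatMap (fun i => pvARow M i) lines [],
    pvJoin_nil, List.nil_append, List.flatMap_def]
  have hfilter : ((lines.map pvCells).map (pvPadPrefix M M.length)).filter (fun r => decide (r ≠ []))
      = ((lines.map pvCells).filter (fun r => decide (r ≠ []))).map (pvPadPrefix M M.length) := by
    rw [List.filter_map]
    congr 1
    apply List.filter_congr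
    intro r _
    simp only [Function.comp]
    by_cases hr : r = []
    · subst hr
      simp [pvPadPrefix]
    · have hpad : pvPadPrefix M M.length r ≠ [] := by
        intro hcon
        apply hr
        have hl := pvPadPrefix_length M M.length r
        rw [hcon] at hl
        exact List.length_eq_zero_iff.mp hl.symm
      simp [hr, hpad]
  rw [hfilter, List.map_map]
  simp only [Function.comp_def]
  rw [pvFlatten_filter (lines.map pvCells)
    (fun r => '|' :: PySem.Chars.join ['|'] (pvPadPrefix M M.length r) ++ ['|', '\n'])]
  apply congrArg List.flatten
  rw [List.map_map]
  apply List.map_congr_left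
  intro i hi
  simp only [Function.comp]
  exact pvRow_eq M i (hb (pvCells i) (List.mem_map_of_mem hi))

-- ===== VERDICT (by name: the statement is the Claim_ definition above) =====
theorem orgtab_spec : Claim_equal_orgtab := by
  intro s _
  unfold Spec_orgtab orgtab orgtab_alt
  exact congrArg String.mk (pvMain (PySem.Chars.splitOn s.toList ['\n']))
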